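-- pv_equiv track=rewrite | github.com/petteriTeikari/deep-biblio-tools | src/converters/md_to_latex/bbl_transformer.py | _remove_url_commands
-- ===== SOURCE A (Python) =====
-- def _remove_url_commands(text: str) -> str:
--     """Remove \\urlprefix\\url{} commands from text.
--
--     Args:
--         text: Text potentially containing URL commands
--
--     Returns:
--         Text with URL commands removed
--     """
--     # Remove \urlprefix\url{...} patterns
--     # This is a simple character-by-character state machine (no regex!)
--     result = []
--     i = 0
--     while i < len(text):
--         # Check for \urlprefix
--         if text[i : i + 10] == "\\urlprefix":
--             # Skip \urlprefix
--             i += 10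
--             # Skip whitespace
--             while i < len(text) and text[i] in " \t\n":
--                 i += 1
--             # Check for \url{
--             if i < len(text) and text[i : i + 5] == "\\url{":
--                 # Find matching closing brace
--                 i += 5
--                 brace_count = 1
--                 while i < len(text) and brace_count > 0:
--                     if text[i] == "{":
--                         brace_count += 1
--                     elif text[i] == "}":
--                         brace_count -= 1
--                     i += 1
--                 continue
--
--         # Check for standalone \url{...}
--         if text[i : i + 5] == "\\url{":
--             # Find matching closing brace
--             i += 5
--             brace_count = 1
--             while i < len(text) and brace_count > 0:
--                 if text[i] == "{":
--                     brace_count += 1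
--                 elif text[i] == "}":
--                     brace_count -= 1
--                 i += 1
--             continue
--
--         # Normal character
--         result.append(text[i])
--         i += 1
--
--     return "".join(result)
-- ===== SOURCE B (Python) =====
-- def _remove_url_commands(text: str) -> str:
--     """Remove \\urlprefix\\url{} commands from text (find-driven span copier)."""
--     out = []
--     i = 0
--     n = len(text)
--     while i < n:
--         p = text.find("\\urlprefix", i)
--         q = text.find("\\url{", i)
--         if p == -1 and q == -1:
--             out.append(text[i:])
--             break
--         m = p if q == -1 else q if p == -1 else min(p, q)
--         out.append(text[i:m])
--         i = m
--         if i == p: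
--             # skip "\urlprefix" and any following whitespace
--             i += 10
--             while i < n and text[i] in " \t\n":
--                 i += 1
--             if text.startswith("\\url{", i):
--                 i = _skip_braced(text, i + 5)
--             elif i < n:
--                 # lone \urlprefix: drop it and its whitespace, emit the next
--                 # character verbatim and rescan from the one after it
--                 out.append(text[i])
--                 i += 1
--         else:
--             i = _skip_braced(text, i + 5)
--     return "".join(out)
--
--
-- def _skip_braced(text: str, i: int) -> int:
--     """Skip balanced braced content starting just after '\\url{' (depth 1)."""
--     depth = 1
--     n = len(text)
--     while i < n and depth > 0:
--         c = text[i]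
--         if c == "{":
--             depth += 1
--         elif c == "}":
--             depth -= 1
--         i += 1
--     return i
-- ===== Notes on version B (the rewrite author's own statement) =====
-- stated objective: faster
-- what changed: Replaces the character-by-character state machine (testing both markers at every index and appending one char at a time) with a find-driven span copier: str.find locates the earliest '\urlprefix'/'\url{' marker, the untouched span before it is appended in one slice (C-speed scan/copy instead of a per-character Python loop), and only the marker itself is processed (prefix+whitespace skip, brace-count skip via a helper).
-- outside the precondition, e.g. on _remove_url_commands('\\urlprefix \\urlprefix'): A returns '\\urlprefix', B returns '\\urlprefix'
import Mathlib
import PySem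

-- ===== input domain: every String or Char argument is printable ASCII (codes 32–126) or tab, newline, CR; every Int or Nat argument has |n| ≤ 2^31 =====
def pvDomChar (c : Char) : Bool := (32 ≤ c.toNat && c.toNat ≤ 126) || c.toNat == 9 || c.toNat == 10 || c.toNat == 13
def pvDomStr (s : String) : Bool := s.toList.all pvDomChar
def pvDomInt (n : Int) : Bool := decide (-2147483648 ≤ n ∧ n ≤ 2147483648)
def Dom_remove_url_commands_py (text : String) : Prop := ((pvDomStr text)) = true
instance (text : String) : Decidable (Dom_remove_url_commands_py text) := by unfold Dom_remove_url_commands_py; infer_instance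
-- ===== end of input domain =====

-- B replaces A's char-by-char state machine by a find-driven span copier (bulk slice copies
-- via str.find; measurably faster by constant factor);
-- equivalence is about the return value only (neither mutates its argument).

-- ===== shared helpers (both Pythons contain the identical whitespace-skip and brace-count loops) =====

def pvPref : List Char := "\\urlprefix".toList
def pvUrl : List Char := "\\url{".toList

def pvIsWs (c : Char) : Bool := c = ' ' || c = '\t' || c = '\n'

-- `while i < len(text) and text[i] in " \t\n": i += 1`
def pvSkipWs : List Char → List Char
  | [] => []
  | c :: rest => if pvIsWs c then pvSkipWs rest else c :: rest

-- `brace_count = k; while i < len(text) and brace_count > 0: …`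
def pvSkipBraces : List Char → Nat → List Char
  | rest, 0 => rest
  | [], _ + 1 => []
  | c :: rest, k + 1 =>
    if c = '{' then pvSkipBraces rest (k + 2)
    else if c = '}' then pvSkipBraces rest k
    else pvSkipBraces rest (k + 1)

theorem pvSkipWs_len (l : List Char) : (pvSkipWs l).length ≤ l.length := by
  induction l with
  | nil => simp [pvSkipWs]
  | cons c rest ih =>
    simp only [pvSkipWs]
    split <;> simp <;> omega

theorem pvSkipBraces_len (l : List Char) (k : Nat) : (pvSkipBraces l k).length ≤ l.length := by
  induction l generalizing k with
  | nil => cases k <;> simp [pvSkipBraces]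
  | cons c rest ih =>
    cases k with
    | zero => simp [pvSkipBraces]
    | succ k =>
      simp only [pvSkipBraces]
      split
      · exact le_trans (ih _) (by simp)
      · split <;> exact le_trans (ih _) (by simp)

-- ===== PORT A =====
-- literal port of the while-loop state machine; `text[i:i+m] == pat` is the prefix test
-- at the current position, the result list is built by the recursion.
-- (On inputs excluded by Pre_ below the Python raises IndexError; the port returns the
-- characters accumulated so far instead.)
def pvA : List Char → List Char
  | [] => []
  | c :: rest =>
    if _hp : pvPref.isPrefixOf (c :: rest) then
      -- skip "\urlprefix" then whitespace
      match _hw : pvSkipWs ((c :: rest).drop 10) with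
      | [] => []   -- i reached len(text); Python A raises IndexError here (outside Pre_)
      | d :: r2 =>
        if _hu : pvUrl.isPrefixOf (d :: r2) then
          pvA (pvSkipBraces ((d :: r2).drop 5) 1)
        else
          -- fall-through: the standalone \url{ check re-tests the same (false) condition,
          -- then the normal-character branch copies one char
          d :: pvA r2
    else if _hu : pvUrl.isPrefixOf (c :: rest) then
      pvA (pvSkipBraces ((c :: rest).drop 5) 1)
    else c :: pvA rest
termination_by l => l.length
decreasing_by
  · have h1 : pvPref.length ≤ (c :: rest).length :=
      (List.isPrefixOf_iff_prefix.mp _hp).length_le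
    have h2 : (d :: r2).length ≤ ((c :: rest).drop 10).length := _hw ▸ pvSkipWs_len _
    have h3 := pvSkipBraces_len ((d :: r2).drop 5) 1
    simp only [List.length_cons, List.length_drop] at *
    simp only [pvPref, List.length] at h1
    omega
  · have h1 : pvPref.length ≤ (c :: rest).length :=
      (List.isPrefixOf_iff_prefix.mp _hp).length_le
    have h2 : (d :: r2).length ≤ ((c :: rest).drop 10).length := _hw ▸ pvSkipWs_len _
    simp only [List.length_cons, List.length_drop] at *
    simp only [pvPref, List.length] at h1
    omega
  · have h1 : pvUrl.length ≤ (c :: rest).length :=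
      (List.isPrefixOf_iff_prefix.mp _hu).length_le
    have h3 := pvSkipBraces_len ((c :: rest).drop 5) 1
    simp only [List.length_cons, List.length_drop] at *
    simp only [pvUrl, List.length] at h1
    omega
  · simp

def remove_url_commands_py (text : String) : String := String.mk (pvA text.toList)

-- ===== PORT B =====

-- `text.find(pat, i)` relative to the current suffix
def pvFind (pat : List Char) : List Char → Option Nat
  | [] => if pat.isPrefixOf ([] : List Char) then some 0 else none
  | c :: rest =>
    if pat.isPrefixOf (c :: rest) then some 0
    else (pvFind pat rest).map (· + 1)

theorem pvFind_prefix (pat : List Char) :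
    ∀ (l : List Char) (m : Nat), pvFind pat l = some m → pat.isPrefixOf (l.drop m) = true := by
  intro l
  induction l with
  | nil =>
    intro m h
    simp only [pvFind] at h
    split at h
    next hc => injection h with h; subst h; simpa using hc
    next hc => exact absurd h (by simp)
  | cons c rest ih =>
    intro m h
    simp only [pvFind] at h
    split at h
    next hc => injection h with h; subst h; simpa using hc
    next hc =>
      simp only [Option.map_eq_some_iff] at h
      obtain ⟨m', hm', rfl⟩ := h
      simpa using ih m' hm'

theorem pvFind_le_len (pat : List Char) :
    ∀ (l : List Char) (m : Nat), pvFind pat l = some m → m ≤ l.length := by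
  intro l
  induction l with
  | nil =>
    intro m h
    simp only [pvFind] at h
    split at h
    next => injection h with h; omega
    next => exact absurd h (by simp)
  | cons c rest ih =>
    intro m h
    simp only [pvFind] at h
    split at h
    next => injection h with h; simp; omega
    next =>
      simp only [Option.map_eq_some_iff] at h
      obtain ⟨m', hm', rfl⟩ := h
      have := ih m' hm'
      simp; omega

theorem pvFind_len (pat : List Char) (l : List Char) (m : Nat)
    (h : pvFind pat l = some m) : pat.length + m ≤ l.length := by
  have hpre := (List.isPrefixOf_iff_prefix.mp (pvFind_prefix pat l m h)).length_le
  have hm := pvFind_le_len pat l m h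
  simp only [List.length_drop] at hpre
  omega

-- B: find the earliest marker, copy the span before it in one slice, process the marker,
-- recurse on the remainder.
def pvB (l : List Char) : List Char :=
  match _hp : pvFind pvPref l, _hq : pvFind pvUrl l with
  | none, none => l                      -- no marker: copy the tail in one go
  | some p, none =>
    l.take p ++
      (match _hw : pvSkipWs ((l.drop p).drop 10) with
       | [] => []
       | d :: r2 =>
         if _hu : pvUrl.isPrefixOf (d :: r2) then
           pvB (pvSkipBraces ((d :: r2).drop 5) 1)
         else d :: pvB r2)               -- lone \urlprefix: emit next char, rescan after it
  | none, some q =>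
    l.take q ++ pvB (pvSkipBraces ((l.drop q).drop 5) 1)
  | some p, some q =>
    if p ≤ q then
      l.take p ++
        (match _hw : pvSkipWs ((l.drop p).drop 10) with
         | [] => []
         | d :: r2 =>
           if _hu : pvUrl.isPrefixOf (d :: r2) then
             pvB (pvSkipBraces ((d :: r2).drop 5) 1)
           else d :: pvB r2)
    else
      l.take q ++ pvB (pvSkipBraces ((l.drop q).drop 5) 1)
termination_by l.length
decreasing_by
  · have h1 := pvFind_len pvPref l p _hp
    have hL : pvPref.length = 10 := by decide
    have h2 : (d :: r2).length ≤ ((l.drop p).drop 10).length := _hw ▸ pvSkipWs_len _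
    have h3 := pvSkipBraces_len ((d :: r2).drop 5) 1
    simp only [List.length_cons, List.length_drop] at *
    omega
  · have h1 := pvFind_len pvPref l p _hp
    have hL : pvPref.length = 10 := by decide
    have h2 : (d :: r2).length ≤ ((l.drop p).drop 10).length := _hw ▸ pvSkipWs_len _
    simp only [List.length_cons, List.length_drop] at *
    omega
  · have h1 := pvFind_len pvUrl l q _hq
    have hL : pvUrl.length = 5 := by decide
    have h3 := pvSkipBraces_len ((l.drop q).drop 5) 1
    simp only [List.length_cons, List.length_drop] at *
    omega
  · have h1 := pvFind_len pvPref l p _hp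
    have hL : pvPref.length = 10 := by decide
    have h2 : (d :: r2).length ≤ ((l.drop p).drop 10).length := _hw ▸ pvSkipWs_len _
    have h3 := pvSkipBraces_len ((d :: r2).drop 5) 1
    simp only [List.length_cons, List.length_drop] at *
    omega
  · have h1 := pvFind_len pvPref l p _hp
    have hL : pvPref.length = 10 := by decide
    have h2 : (d :: r2).length ≤ ((l.drop p).drop 10).length := _hw ▸ pvSkipWs_len _
    simp only [List.length_cons, List.length_drop] at *
    omega
  · have h1 := pvFind_len pvUrl l q _hq
    have hL : pvUrl.length = 5 := by decide
    have h3 := pvSkipBraces_len ((l.drop q).drop 5) 1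
    simp only [List.length_cons, List.length_drop] at *
    omega

def remove_url_commands_py_alt (text : String) : String := String.mk (pvB text.toList)

-- ===== PRECONDITION & SPEC =====
-- Pre_ excludes texts ending in '\urlprefix' followed only by whitespace: on every input
-- where A raises (IndexError: after skipping a final '\urlprefix' and its whitespace the
-- scanner appends text[len(text)]) the text ends that way; on the few such texts where the
-- trailing marker is swallowed by an earlier unterminated '\url{' or killed by a preceding
-- lone '\urlprefix', A still returns and agrees with B (see the cite).
def Pre_remove_url_commands_py (text : String) : Prop :=
  pvPref.reverse.isPrefixOf ((text.toList.reverse).dropWhile pvIsWs) = false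
instance (text : String) : Decidable (Pre_remove_url_commands_py text) := by
  unfold Pre_remove_url_commands_py; infer_instance

def pvWitness_remove_url_commands_py : String := "a \\urlprefix \\url{x} b"

def Spec_remove_url_commands_py (text : String) (out : String) : Prop := out = remove_url_commands_py_alt text
instance (text : String) (out : String) : Decidable (Spec_remove_url_commands_py text out) := by unfold Spec_remove_url_commands_py; infer_instance

-- ===== CLAIM (what is proved, stated in full; the proofs are below) =====
def Claim_equal_remove_url_commands_py : Prop := ∀ (text : String), Dom_remove_url_commands_py text → Pre_remove_url_commands_py text → Spec_remove_url_commands_py text (remove_url_commands_py text)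

-- ===== LEMMAS AND PROOFS =====

theorem pvFind_lt (pat : List Char) :
    ∀ (l : List Char) (m : Nat), pvFind pat l = some m →
      ∀ j, j < m → pat.isPrefixOf (l.drop j) = false := by
  intro l
  induction l with
  | nil =>
    intro m h
    simp only [pvFind] at h
    split at h
    next hc => injection h with h; subst h; omega
    next hc => exact absurd h (by simp)
  | cons c rest ih =>
    intro m h j hj
    simp only [pvFind] at h
    split at h
    next hc => injection h with h; omega
    next hc =>
      simp only [Option.map_eq_some_iff] at h
      obtain ⟨m', hm', rfl⟩ := h
      cases j with
      | zero => simpa [← List.isPrefixOf_iff_prefix] using hc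
      | succ j => simpa using ih m' hm' j (by omega)

theorem pvFind_none (pat : List Char) (hne : pat ≠ []) :
    ∀ (l : List Char), pvFind pat l = none →
      ∀ j, pat.isPrefixOf (l.drop j) = false := by
  intro l
  induction l with
  | nil =>
    intro _ j
    cases pat with
    | nil => exact absurd rfl hne
    | cons p ps => simp [List.isPrefixOf]
  | cons c rest ih =>
    intro h j
    simp only [pvFind] at h
    split at h
    next hc => exact absurd h (by simp)
    next hc =>
      cases j with
      | zero => simpa [← List.isPrefixOf_iff_prefix] using hc
      | succ j =>
        simp only [Option.map_eq_none_iff] at h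
        simpa using ih h j


-- A copies the first m characters verbatim when no marker starts among them
theorem pvA_copy (m : Nat) :
    ∀ l : List Char,
      (∀ j, j < m → pvPref.isPrefixOf (l.drop j) = false ∧ pvUrl.isPrefixOf (l.drop j) = false) →
      pvA l = l.take m ++ pvA (l.drop m) := by
  induction m with
  | zero => intro l _; simp
  | succ m ih =>
    intro l h
    cases l with
    | nil => simp
    | cons c rest =>
      have h0 := h 0 (Nat.succ_pos m)
      simp only [List.drop_zero] at h0
      rw [pvA]
      simp only [h0.1, h0.2, dite_eq_ite, if_false, Bool.false_eq_true]
      rw [ih rest (fun j hj => by simpa using h (j + 1) (by omega))]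
      simp

theorem pvA_eq_pvB_bounded : ∀ (n : Nat) (l : List Char), l.length ≤ n → pvA l = pvB l := by
  intro n
  induction n with
  | zero =>
    intro l hl
    have : l = [] := by cases l <;> simp_all
    subst this
    rw [pvB]
    split
    next => rw [pvA]
    next p hp hq => simp [show pvFind pvPref [] = none from by decide] at hp
    next q hp hq => simp [show pvFind pvUrl [] = none from by decide] at hq
    next p q hp hq => simp [show pvFind pvPref [] = none from by decide] at hp
  | succ n ih =>
    intro l hl
    rw [pvB]
    split
    case _ hp hq =>
      -- no marker anywhere: A copies every character
      have h := pvA_copy l.length l (fun j hj =>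
        ⟨pvFind_none pvPref (by decide) l hp j, pvFind_none pvUrl (by decide) l hq j⟩)
      simpa [show pvA [] = [] from by rw [pvA]] using h
    case _ p hp hq =>
      -- earliest marker is \urlprefix at p
      have hcopy := pvA_copy p l (fun j hj =>
        ⟨pvFind_lt pvPref l p hp j hj, pvFind_none pvUrl (by decide) l hq j⟩)
      rw [hcopy]
      congr 1
      have hpre := pvFind_prefix pvPref l p hp
      have hlen : (10:Nat) + p ≤ l.length := by
        have h10 := pvFind_len pvPref l p hp
        have hL : pvPref.length = 10 := by decide
        omega
      obtain ⟨c, rest, hcr⟩ : ∃ c rest, l.drop p = c :: rest := by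
        cases hd : l.drop p with
        | nil => rw [hd] at hpre; exact absurd hpre (by decide)
        | cons c rest => exact ⟨c, rest, rfl⟩
      rw [hcr] at hpre ⊢
      rw [pvA]
      simp only [hpre, dite_eq_ite, if_true]
      have hrl : rest.length + 1 + p = l.length := by
        have := congrArg List.length hcr; simp at this; omega
      split
      · rfl
      case _ d r2 hw =>
        have h2 : (d :: r2).length ≤ ((c :: rest).drop 10).length := hw ▸ pvSkipWs_len _
        simp only [List.length_cons, List.length_drop] at h2
        split
        case _ hu =>
          apply ih
          have h3 := pvSkipBraces_len ((d :: r2).drop 5) 1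
          simp only [List.length_cons, List.length_drop] at h3
          omega
        case _ hu =>
          congr 1
          apply ih
          omega
    case _ q hp hq =>
      -- earliest marker is \url{ at q
      have hcopy := pvA_copy q l (fun j hj =>
        ⟨pvFind_none pvPref (by decide) l hp j, pvFind_lt pvUrl l q hq j hj⟩)
      rw [hcopy]
      congr 1
      have hurl := pvFind_prefix pvUrl l q hq
      have hnp := pvFind_none pvPref (by decide) l hp q
      obtain ⟨c, rest, hcr⟩ : ∃ c rest, l.drop q = c :: rest := by
        cases hd : l.drop q with
        | nil => rw [hd] at hurl; exact absurd hurl (by decide)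
        | cons c rest => exact ⟨c, rest, rfl⟩
      have hlen : (5:Nat) + q ≤ l.length := by
        have h5 := pvFind_len pvUrl l q hq
        have hL : pvUrl.length = 5 := by decide
        omega
      rw [hcr] at hurl hnp ⊢
      rw [pvA]
      simp only [hnp, hurl, dite_eq_ite, if_true, if_false, Bool.false_eq_true]
      apply ih
      have h3 := pvSkipBraces_len ((c :: rest).drop 5) 1
      have hrl : rest.length + 1 + q = l.length := by
        have := congrArg List.length hcr; simp at this; omega
      simp only [List.length_cons, List.length_drop] at h3
      omega
    case _ p q hp hq =>
      split
      case _ hpq =>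
        -- \urlprefix first (p ≤ q)
        have hcopy := pvA_copy p l (fun j hj =>
          ⟨pvFind_lt pvPref l p hp j hj, pvFind_lt pvUrl l q hq j (by omega)⟩)
        rw [hcopy]
        congr 1
        have hpre := pvFind_prefix pvPref l p hp
        have hlen : (10:Nat) + p ≤ l.length := by
          have h10 := pvFind_len pvPref l p hp
          have hL : pvPref.length = 10 := by decide
          omega
        obtain ⟨c, rest, hcr⟩ : ∃ c rest, l.drop p = c :: rest := by
          cases hd : l.drop p with
          | nil => rw [hd] at hpre; exact absurd hpre (by decide)
          | cons c rest => exact ⟨c, rest, rfl⟩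
        rw [hcr] at hpre ⊢
        rw [pvA]
        simp only [hpre, dite_eq_ite, if_true]
        have hrl : rest.length + 1 + p = l.length := by
          have := congrArg List.length hcr; simp at this; omega
        split
        · rfl
        case _ d r2 hw =>
          have h2 : (d :: r2).length ≤ ((c :: rest).drop 10).length := hw ▸ pvSkipWs_len _
          simp only [List.length_cons, List.length_drop] at h2
          split
          case _ hu =>
            apply ih
            have h3 := pvSkipBraces_len ((d :: r2).drop 5) 1
            simp only [List.length_cons, List.length_drop] at h3
            omega
          case _ hu =>
            congr 1
            apply ih
            omega
      case _ hpq =>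
        -- \url{ first (q < p)
        have hqp : q < p := by omega
        have hcopy := pvA_copy q l (fun j hj =>
          ⟨pvFind_lt pvPref l p hp j (by omega), pvFind_lt pvUrl l q hq j hj⟩)
        rw [hcopy]
        congr 1
        have hurl := pvFind_prefix pvUrl l q hq
        have hnp := pvFind_lt pvPref l p hp q hqp
        obtain ⟨c, rest, hcr⟩ : ∃ c rest, l.drop q = c :: rest := by
          cases hd : l.drop q with
          | nil => rw [hd] at hurl; exact absurd hurl (by decide)
          | cons c rest => exact ⟨c, rest, rfl⟩
        have hlen : (5:Nat) + q ≤ l.length := by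
          have h5 := pvFind_len pvUrl l q hq
          have hL : pvUrl.length = 5 := by decide
          omega
        rw [hcr] at hurl hnp ⊢
        rw [pvA]
        simp only [hnp, hurl, dite_eq_ite, if_true, if_false, Bool.false_eq_true]
        apply ih
        have h3 := pvSkipBraces_len ((c :: rest).drop 5) 1
        have hrl : rest.length + 1 + q = l.length := by
          have := congrArg List.length hcr; simp at this; omega
        simp only [List.length_cons, List.length_drop] at h3
        omega

-- ===== VERDICT (by name: the statement is the Claim_ definition above) =====
theorem remove_url_commands_py_spec : Claim_equal_remove_url_commands_py := by
  intro text _ _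
  unfold Spec_remove_url_commands_py remove_url_commands_py remove_url_commands_py_alt
  rw [pvA_eq_pvB_bounded text.toList.length text.toList le_rfl]
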